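-- pv_equiv track=rewrite | github.com/daxida/lingq | others/text_processing/splits/split_multilevel.py | separate_by_heading
-- ===== SOURCE A (Python) =====
-- def separate_by_heading(lines: list[str], heading_list: set[str]) -> dict[str, list[str]]:
--     separated_data = {}
--     buf = []
--     heading = None
--     lines_len = len(lines)
--
--     for idx, line in enumerate(lines):
--         if line.strip() in heading_list:
--             if buf and heading:
--                 separated_data[heading] = buf
--             heading = line.strip()
--             buf = []
--         else:
--             buf.append(line)
--
--         # Dump buffer at the end of input
--         if idx + 1 == lines_len:
--             if buf:
--                 separated_data[heading] = buf
--
--     return separated_data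
-- ===== SOURCE B (Python) =====
-- def separate_by_heading(lines: list[str], heading_list: set[str]) -> dict[str, list[str]]:
--     # Heading-position chunking: collect the heading positions once, pair each with the
--     # next heading's position (or the end of input), and cut every section out with a slice.
--     heads = [(i, line.strip()) for i, line in enumerate(lines) if line.strip() in heading_list]
--     bounds = [i for i, _ in heads[1:]] + [len(lines)]
--     data = {}
--     for (i, h), end in zip(heads, bounds):
--         section = lines[i + 1:end]
--         if section:
--             data[h] = section
--     return data
-- ===== Notes on version B (the rewrite author's own statement) =====
-- stated objective: alternative
-- what changed: B replaces A's single pass with a running buffer, an Optional heading and an end-of-input dump by heading-position chunking: collect heading positions once, pair each with the next heading position, and cut each section out with one slice; Pre_ excludes inputs where non-empty lines contain no heading (A returns a dict keyed by None, not a str) and inputs where a line stripping to the empty heading "" opens a non-empty section followed by another heading line (A's truthiness flush guard then silently drops that section, an artefact of its implementation).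
-- outside the precondition, e.g. on separate_by_heading(['a'], set()): A returns {None: ['a']}, B returns {}; on separate_by_heading(['', 'x', 'H'], {'', 'H'}): A returns {}, B returns {'': ['x']}
import Mathlib
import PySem

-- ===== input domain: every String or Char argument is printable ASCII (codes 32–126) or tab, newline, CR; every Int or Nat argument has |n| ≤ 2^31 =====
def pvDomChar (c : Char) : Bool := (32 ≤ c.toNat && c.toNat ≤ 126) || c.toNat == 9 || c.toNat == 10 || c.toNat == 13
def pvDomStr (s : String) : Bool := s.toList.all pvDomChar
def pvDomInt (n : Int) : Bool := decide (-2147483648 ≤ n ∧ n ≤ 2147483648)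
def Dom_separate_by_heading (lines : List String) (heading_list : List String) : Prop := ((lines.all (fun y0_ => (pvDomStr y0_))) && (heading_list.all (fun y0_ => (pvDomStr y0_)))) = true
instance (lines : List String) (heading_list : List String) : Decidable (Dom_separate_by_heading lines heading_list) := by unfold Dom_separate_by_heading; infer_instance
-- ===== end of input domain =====

-- B replaces A's single pass with buffer/flush state by heading-position chunking:
-- collect heading positions once, pair each with the next heading position, and cut
-- every section out with one slice; same cost, different decomposition.

-- ===== PORT A =====
-- Python's `line.strip() in heading_list` (set membership on strings)
def aIsHead (heading_list : List String) (line : String) : Bool :=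
  heading_list.contains (PySem.Str.strip line)

-- one iteration of A's for-body (before the end-of-input check):
-- state = (separated_data, buf, heading); heading : Option String models Python's None
def aStep (heading_list : List String)
    (st : PySem.Dict String (List String) × List String × Option String) (line : String) :
    PySem.Dict String (List String) × List String × Option String :=
  let (data, buf, heading) := st
  if aIsHead heading_list line then
    -- `if buf and heading:` — heading truthy means not None and not ""
    let data := match heading with
      | some h => if buf ≠ [] ∧ h ≠ "" then data.insert h buf else data
      | none => data
    (data, [], some (PySem.Str.strip line))
  else
    (data, buf ++ [line], heading)

-- the `idx + 1 == lines_len` dump: `if buf: separated_data[heading] = buf`.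
-- heading = None here would give Python's None dict key, which is not a String:
-- exactly those inputs are excluded by Pre_, so the none branch leaves data unchanged.
def aFinal (st : PySem.Dict String (List String) × List String × Option String) :
    PySem.Dict String (List String) :=
  let (data, buf, heading) := st
  if buf ≠ [] then
    match heading with
    | some h => data.insert h buf
    | none => data
  else data

-- A's `for idx, line in enumerate(lines)` loop: the `idx + 1 == lines_len` test is true
-- exactly on the last element, so the recursion dumps via aFinal there.
def aRun (heading_list : List String)
    (st : PySem.Dict String (List String) × List String × Option String) :
    List String → PySem.Dict String (List String)
  | [] => st.1
  | line :: rest =>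
    let st' := aStep heading_list st line
    match rest with
    | [] => aFinal st'
    | _ :: _ => aRun heading_list st' rest

def separate_by_heading (lines : List String) (heading_list : List String) :
    List (String × List String) :=
  (aRun heading_list (PySem.Dict.empty, [], none) lines).items

-- ===== PORT B =====
-- Source B: heads = [(i, line.strip()) for i, line in enumerate(lines) if line.strip() in heading_list]
--       bounds = [i for i, _ in heads[1:]] + [len(lines)]
--       for (i, h), end in zip(heads, bounds): section = lines[i+1:end]; if section: data[h] = section
-- the loop body: section = lines[i+1:end]; if section: data[h] = section
def bBody (lines : List String) (data : PySem.Dict String (List String))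
    (p : (Int × String) × Int) : PySem.Dict String (List String) :=
  let sec := PySem.List.slice lines (some (p.1.1 + 1)) (some p.2)
  if sec ≠ [] then data.insert p.1.2 sec else data

def separate_by_heading_alt (lines : List String) (heading_list : List String) :
    List (String × List String) :=
  let heads := ((PySem.List.enumerate lines 0).filter
      (fun p => heading_list.contains (PySem.Str.strip p.2))).map
      (fun p => (p.1, PySem.Str.strip p.2))
  let bounds := ((PySem.List.slice heads (some 1) none).map Prod.fst) ++ [(lines.length : Int)]
  ((heads.zip bounds).foldl (bBody lines) PySem.Dict.empty).items

-- ===== PRECONDITION & SPEC =====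
-- Pre_ excludes (a) non-empty lines with no heading line: A returns a dict whose only key
-- is Python's None, not a value of the declared dict[str, list[str]] type; and (b) inputs
-- where a line stripping to the empty heading "" opens a non-empty section that is
-- followed by another heading line: A's truthiness flush guard then silently drops that
-- section, an artefact of A's implementation.
def Pre_separate_by_heading (lines : List String) (heading_list : List String) : Prop :=
  (lines = [] ∨ ∃ l ∈ lines, PySem.Str.strip l ∈ heading_list) ∧
  ¬ ∃ i < lines.length, PySem.Str.strip (lines.getD i "") = "" ∧ "" ∈ heading_list ∧
      i + 1 < lines.length ∧ PySem.Str.strip (lines.getD (i + 1) "") ∉ heading_list ∧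
      ∃ j < lines.length, i + 1 < j ∧ PySem.Str.strip (lines.getD j "") ∈ heading_list

instance (lines : List String) (heading_list : List String) :
    Decidable (Pre_separate_by_heading lines heading_list) := by
  unfold Pre_separate_by_heading; infer_instance

def pvWitness_separate_by_heading : List String × List String :=
  (["H1", "a", "b", " H2 ", "c"], ["H1", "H2"])

def Spec_separate_by_heading (lines : List String) (heading_list : List String) (out : List (String × List String)) : Prop := out = separate_by_heading_alt lines heading_list
instance (lines : List String) (heading_list : List String) (out : List (String × List String)) : Decidable (Spec_separate_by_heading lines heading_list out) := by unfold Spec_separate_by_heading; infer_instance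

-- ===== CLAIM =====
def Claim_equal_separate_by_heading : Prop := ∀ (lines : List String) (heading_list : List String), Dom_separate_by_heading lines heading_list → Pre_separate_by_heading lines heading_list → Spec_separate_by_heading lines heading_list (separate_by_heading lines heading_list)

-- ===== LEMMAS AND PROOFS =====

-- Proof-side chunk-at-a-time view of the computation; A's pass and B's slicing are both
-- reduced to it.
def cFindHead (hl : List String) (ls : List String) : Option Nat :=
  ls.findIdx? (aIsHead hl)

def cLoop (hl : List String) (data : PySem.Dict String (List String))
    (h : String) (rest : List String) : PySem.Dict String (List String) :=
  match hj : cFindHead hl rest with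
  | none => if rest ≠ [] then data.insert h rest else data
  | some j =>
    let data := if rest.take j ≠ [] ∧ h ≠ "" then data.insert h (rest.take j) else data
    cLoop hl data (PySem.Str.strip (rest.getD j "")) (rest.drop (j + 1))
termination_by rest.length
decreasing_by
  have hjlt : j < rest.length := by
    have := List.findIdx?_eq_some_iff_findIdx_eq.mp hj
    omega
  simp [List.length_drop]; omega

-- the first heading line after a headless prefix
theorem cFindHead_split (hl : List String) (b : List String) (line : String)
    (rest : List String) (hb : ∀ l ∈ b, aIsHead hl l = false)
    (hline : aIsHead hl line = true) :
    cFindHead hl (b ++ line :: rest) = some b.length := by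
  unfold cFindHead
  rw [List.findIdx?_append, List.findIdx?_eq_none_iff.mpr hb, List.findIdx?_cons, hline]
  simp

theorem cLoop_no_head (hl : List String) (d : PySem.Dict String (List String)) (h : String)
    (ls : List String) (hb : ∀ l ∈ ls, aIsHead hl l = false) :
    cLoop hl d h ls = if ls ≠ [] then d.insert h ls else d := by
  rw [cLoop]
  have : cFindHead hl ls = none := by
    unfold cFindHead; exact List.findIdx?_eq_none_iff.mpr hb
  split
  · rfl
  · next j hj => rw [this] at hj; cases hj

theorem cLoop_split (hl : List String) (d : PySem.Dict String (List String)) (h : String)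
    (b : List String) (line : String) (rest : List String)
    (hb : ∀ l ∈ b, aIsHead hl l = false) (hline : aIsHead hl line = true) :
    cLoop hl d h (b ++ line :: rest) =
      cLoop hl (if b ≠ [] ∧ h ≠ "" then d.insert h b else d) (PySem.Str.strip line) rest := by
  rw [cLoop]
  have hfind := cFindHead_split hl b line rest hb hline
  split
  · next hj => rw [hfind] at hj; cases hj
  · next j hj =>
    rw [hfind] at hj
    injection hj with hj
    subst hj
    have htake : (b ++ line :: rest).take b.length = b := List.take_left
    have hgetD : (b ++ line :: rest).getD b.length "" = line := by
      rw [List.getD_eq_getElem?_getD, List.getElem?_append_right (Nat.le_refl _)]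
      simp
    have hdrop : (b ++ line :: rest).drop (b.length + 1) = rest := by
      have : b ++ line :: rest = (b ++ [line]) ++ rest := by simp
      rw [this]
      have hlen : (b ++ [line]).length = b.length + 1 := by simp
      rw [← hlen, List.drop_left]
    rw [htake, hgetD, hdrop]

-- Main A-side invariant: after the first heading, A's buffered single pass equals the
-- chunk recursion, with A's pending buffer b (non-heading lines) prepended to the input.
theorem aRun_eq_cLoop (hl : List String) (ls : List String) (hne : ls ≠ [])
    (d : PySem.Dict String (List String)) (b : List String) (h : String)
    (hb : ∀ l ∈ b, aIsHead hl l = false) :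
    aRun hl (d, b, some h) ls = cLoop hl d h (b ++ ls) := by
  induction ls generalizing d b h with
  | nil => exact absurd rfl hne
  | cons line rest ih =>
    by_cases hline : aIsHead hl line = true
    · rw [cLoop_split hl d h b line rest hb hline]
      cases rest with
      | nil =>
        rw [cLoop_no_head hl _ _ [] (by simp)]
        simp only [aRun, aStep, hline, aFinal]
        simp
      | cons r rs =>
        have h2 := ih (by simp) (if b ≠ [] ∧ h ≠ "" then d.insert h b else d) []
          (PySem.Str.strip line) (by simp)
        simp only [List.nil_append] at h2
        rw [← h2]
        simp only [aRun, aStep, hline]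
        simp
    · rw [Bool.not_eq_true] at hline
      have hb' : ∀ l ∈ b ++ [line], aIsHead hl l = false := by
        intro l hmem
        rcases List.mem_append.mp hmem with hm | hm
        · exact hb l hm
        · simp at hm; subst hm; exact hline
      cases rest with
      | nil =>
        rw [show b ++ [line] = b ++ line :: [] from rfl, cLoop_no_head hl d h _ hb']
        simp only [aRun, aStep, hline, aFinal]
        simp
      | cons r rs =>
        have := ih (by simp) d (b ++ [line]) h hb'
        rw [List.append_assoc] at this
        simp only [List.singleton_append] at this
        rw [← this]
        simp only [aRun, aStep, hline]
        simp

-- Pre-heading phase: with heading = None, A accumulates (and at the first heading drops)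
-- lines; reaching the first heading hands over to the invariant above.
theorem aRun_none (hl : List String) (ls : List String) (k : Nat)
    (hk : ls.findIdx? (aIsHead hl) = some k)
    (d : PySem.Dict String (List String)) (b : List String) :
    aRun hl (d, b, none) ls = cLoop hl d (PySem.Str.strip (ls.getD k "")) (ls.drop (k + 1)) := by
  induction ls generalizing k b with
  | nil => cases hk
  | cons line rest ih =>
    rw [List.findIdx?_cons] at hk
    by_cases hline : aIsHead hl line = true
    · rw [if_pos hline] at hk
      injection hk with hk
      subst hk
      simp only [List.getD_eq_getElem?_getD, List.getElem?_cons_zero, Option.getD_some,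
        List.drop_succ_cons, List.drop_zero]
      cases rest with
      | nil =>
        rw [cLoop_no_head hl d _ [] (by simp)]
        simp only [aRun, aStep, hline, aFinal]
        simp
      | cons r rs =>
        have h2 := aRun_eq_cLoop hl (r :: rs) (by simp) d [] (PySem.Str.strip line) (by simp)
        simp only [List.nil_append] at h2
        rw [← h2]
        simp only [aRun, aStep, hline]
        simp
    · rw [if_neg hline] at hk
      rw [Bool.not_eq_true] at hline
      cases hrest : rest.findIdx? (aIsHead hl) with
      | none => rw [hrest] at hk; cases hk
      | some j =>
        rw [hrest] at hk
        injection hk with hk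
        subst hk
        have hrne : rest ≠ [] := by
          intro hnil; rw [hnil] at hrest; cases hrest
        have step : aRun hl (d, b, none) (line :: rest) = aRun hl (d, b ++ [line], none) rest := by
          cases rest with
          | nil => exact absurd rfl hrne
          | cons r rs =>
            simp [aRun, aStep, hline]
        rw [step, ih j hrest (b ++ [line])]
        simp only [List.getD_eq_getElem?_getD, List.getElem?_cons_succ, List.drop_succ_cons]

-- unfolding lemmas for cLoop's dependent match
theorem cLoop_eq_none (hl : List String) (d : PySem.Dict String (List String)) (h : String)
    (rest : List String) (hfind : cFindHead hl rest = none) :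
    cLoop hl d h rest = if rest ≠ [] then d.insert h rest else d := by
  rw [cLoop]
  split
  · rfl
  · next t ht => rw [hfind] at ht; cases ht

theorem cLoop_eq_some (hl : List String) (d : PySem.Dict String (List String)) (h : String)
    (rest : List String) (t : Nat) (hfind : cFindHead hl rest = some t) :
    cLoop hl d h rest =
      cLoop hl (if rest.take t ≠ [] ∧ h ≠ "" then d.insert h (rest.take t) else d)
        (PySem.Str.strip (rest.getD t "")) (rest.drop (t + 1)) := by
  rw [cLoop]
  split
  · next ht => rw [hfind] at ht; cases ht
  · next u hu => rw [hfind] at hu; injection hu with hu; subst hu; rfl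

-- B-side proof helpers --------------------------------------------------------

-- the (position, stripped text) list of heading lines of `lines` at positions ≥ p
def headsFrom (hl : List String) (lines : List String) (p : Nat) : List (Int × String) :=
  if hp : p < lines.length then
    if aIsHead hl lines[p] then
      ((p : Int), PySem.Str.strip lines[p]) :: headsFrom hl lines (p + 1)
    else headsFrom hl lines (p + 1)
  else []
termination_by lines.length - p

-- Source B's comprehension computes headsFrom 0
theorem heads_eq_headsFrom (hl : List String) (lines : List String) (p : Nat)
    (hp : p ≤ lines.length) :
    ((PySem.List.enumerate (lines.drop p) (p : Int)).filter
        (fun q => hl.contains (PySem.Str.strip q.2))).map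
        (fun q => (q.1, PySem.Str.strip q.2)) = headsFrom hl lines p := by
  rw [headsFrom]
  by_cases hlt : p < lines.length
  · rw [dif_pos hlt]
    have hdrop : lines.drop p = lines[p] :: lines.drop (p + 1) :=
      List.drop_eq_getElem_cons hlt
    rw [hdrop, PySem.List.enumerate_cons, List.filter_cons]
    have hc : ((p : Int) + 1) = (((p + 1 : Nat)) : Int) := by push_cast; ring
    rw [hc]
    by_cases hh : aIsHead hl lines[p] = true
    · rw [if_pos hh]
      have : (hl.contains (PySem.Str.strip lines[p])) = true := hh
      simp only [this, if_true, List.map_cons]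
      rw [heads_eq_headsFrom hl lines (p + 1) hlt]
    · rw [if_neg hh]
      have : (hl.contains (PySem.Str.strip lines[p])) = false := by
        simpa [aIsHead] using hh
      simp only [this, Bool.false_eq_true, if_false]
      rw [heads_eq_headsFrom hl lines (p + 1) hlt]
  · rw [dif_neg hlt]
    have hpn : p = lines.length := by omega
    rw [hpn, List.drop_length]
    simp [PySem.List.enumerate_nil]
termination_by lines.length - p

-- headsFrom in terms of the first-heading search on the suffix
theorem headsFrom_eq_find (hl : List String) (lines : List String) (p : Nat) :
    headsFrom hl lines p =
      match (lines.drop p).findIdx? (aIsHead hl) with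
      | none => []
      | some t => (((p + t : Nat) : Int), PySem.Str.strip (lines.getD (p + t) "")) ::
          headsFrom hl lines (p + t + 1) := by
  rw [headsFrom]
  by_cases hlt : p < lines.length
  · rw [dif_pos hlt]
    have hdrop : lines.drop p = lines[p] :: lines.drop (p + 1) :=
      List.drop_eq_getElem_cons hlt
    rw [hdrop, List.findIdx?_cons]
    by_cases hh : aIsHead hl lines[p] = true
    · rw [if_pos hh]
      simp [hh, List.getD_eq_getElem?_getD, List.getElem?_eq_getElem hlt]
    · rw [if_neg hh]
      rw [headsFrom_eq_find hl lines (p + 1)]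
      cases hf : (lines.drop (p + 1)).findIdx? (aIsHead hl) with
      | none => simp [hh]
      | some t =>
        have h1 : p + 1 + t = p + (t + 1) := by omega
        have h2 : p + 1 + t + 1 = p + (t + 1) + 1 := by omega
        simp [hh, h1]
  · rw [dif_neg hlt]
    have : lines.drop p = [] := List.drop_eq_nil_of_le (by omega)
    rw [this]
    simp
termination_by lines.length - p

-- Source B's loop over zip(heads, bounds), abstracted to a structural recursion
def dLoop (lines : List String) (data : PySem.Dict String (List String)) :
    List (Int × String) → PySem.Dict String (List String)
  | [] => data
  | (i, h) :: rest =>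
    let e : Int := match rest with | [] => (lines.length : Int) | (j, _) :: _ => j
    dLoop lines (bBody lines data ((i, h), e)) rest

-- the zip-with-next-boundary fold is exactly dLoop
theorem zip_fold_eq_dLoop (lines : List String) (hs : List (Int × String))
    (data : PySem.Dict String (List String)) :
    (hs.zip (((hs.drop 1).map Prod.fst) ++ [(lines.length : Int)])).foldl
      (bBody lines) data = dLoop lines data hs := by
  induction hs generalizing data with
  | nil => simp [dLoop]
  | cons ih0 rest ih =>
    obtain ⟨i, h⟩ := ih0
    cases rest with
    | nil => simp [dLoop]
    | cons q rs =>
      obtain ⟨j, h'⟩ := q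
      simp only [List.drop_succ_cons, List.drop_zero, List.map_cons, List.cons_append,
        List.zip_cons_cons, List.foldl_cons] at ih ⊢
      rw [ih]
      simp [dLoop]

-- From Pre_: a heading line stripping to "" is never followed by a non-empty section and
-- a further heading.  mk_hcur turns that into the invariant carried through cLoop_eq_dLoop:
-- the current heading is non-empty, or nothing follows any later heading flush.
theorem mk_hcur (hl : List String) (lines : List String)
    (hglob : ∀ i : Nat, i < lines.length → PySem.Str.strip (lines.getD i "") = "" →
      "" ∈ hl → i + 1 < lines.length →
      PySem.Str.strip (lines.getD (i + 1) "") ∉ hl →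
      ∀ j : Nat, j < lines.length → i + 1 < j →
      PySem.Str.strip (lines.getD j "") ∈ hl → False)
    (p : Nat) (hp : p < lines.length)
    (hhead : aIsHead hl (lines.getD p "") = true) :
    PySem.Str.strip (lines.getD p "") ≠ "" ∨
    (∀ u, p + 1 < u → u < lines.length → aIsHead hl (lines.getD u "") = false) ∨
    (p + 1 < lines.length ∧ aIsHead hl (lines.getD (p + 1) "") = true) := by
  by_cases hz : PySem.Str.strip (lines.getD p "") = ""
  · have hzin : "" ∈ hl := by
      have : PySem.Str.strip (lines.getD p "") ∈ hl := by simpa [aIsHead] using hhead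
      rwa [hz] at this
    by_cases hn : p + 1 < lines.length
    · by_cases hq : aIsHead hl (lines.getD (p + 1) "") = true
      · exact Or.inr (Or.inr ⟨hn, hq⟩)
      · refine Or.inr (Or.inl ?_)
        intro u hu1 hu2
        by_cases hr : aIsHead hl (lines.getD u "") = true
        · exact absurd (hglob p hp hz hzin hn (by simpa [aIsHead] using hq) u hu2 hu1
            (by simpa [aIsHead] using hr)) not_false
        · rw [Bool.not_eq_true] at hr
          exact hr
    · refine Or.inr (Or.inl ?_)
      intro u hu1 hu2
      exact absurd hu2 (by omega)
  · exact Or.inl hz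

-- the chunk recursion equals dLoop on the remaining heads, under the invariant above
theorem cLoop_eq_dLoop (hl : List String) (lines : List String)
    (hglob : ∀ i : Nat, i < lines.length → PySem.Str.strip (lines.getD i "") = "" →
      "" ∈ hl → i + 1 < lines.length →
      PySem.Str.strip (lines.getD (i + 1) "") ∉ hl →
      ∀ j : Nat, j < lines.length → i + 1 < j →
      PySem.Str.strip (lines.getD j "") ∈ hl → False)
    (pos : Nat) (hpos : pos ≤ lines.length)
    (d : PySem.Dict String (List String)) (i : Int) (hi : i + 1 = (pos : Int))
    (h : String)
    (hcur : h ≠ "" ∨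
      (∀ u, pos < u → u < lines.length → aIsHead hl (lines.getD u "") = false) ∨
      (pos < lines.length ∧ aIsHead hl (lines.getD pos "") = true)) :
    cLoop hl d h (lines.drop pos) = dLoop lines d ((i, h) :: headsFrom hl lines pos) := by
  rw [headsFrom_eq_find]
  cases hf : (lines.drop pos).findIdx? (aIsHead hl) with
  | none =>
    rw [cLoop_eq_none hl d h _ hf]
    simp only [dLoop, bBody, hi]
    rw [PySem.List.slice_natCast]
    have hlen : (lines.drop pos).length = lines.length - pos := List.length_drop
    have htk : (lines.drop pos).take (lines.length - pos) = lines.drop pos := by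
      rw [← hlen]; exact List.take_length
    rw [htk]
  | some t =>
    have ht : t < (lines.drop pos).length := by
      have := List.findIdx?_eq_some_iff_findIdx_eq.mp hf
      omega
    have htabs : pos + t < lines.length := by
      simp only [List.length_drop] at ht; omega
    have hgetD : (lines.drop pos).getD t "" = lines.getD (pos + t) "" := by
      rw [List.getD_eq_getElem?_getD, List.getD_eq_getElem?_getD, List.getElem?_drop]
    have hhead : aIsHead hl (lines.getD (pos + t) "") = true := by
      obtain ⟨hb, hp, _⟩ := List.findIdx?_eq_some_iff_getElem.mp hf
      rw [← hgetD, List.getD_eq_getElem?_getD, List.getElem?_eq_getElem hb, Option.getD_some]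
      exact hp
    have hcur' := mk_hcur hl lines hglob (pos + t) htabs hhead
    have hsec : PySem.List.slice lines (some ((pos : Int))) (some ((pos + t : Nat) : Int)) =
        (lines.drop pos).take t := by
      rw [PySem.List.slice_natCast]
      congr 1
      omega
    have hdrop2 : (lines.drop pos).drop (t + 1) = lines.drop (pos + t + 1) := by
      rw [List.drop_drop]; try congr 1; try omega
    rw [cLoop_eq_some hl d h _ t hf, hgetD, hdrop2]
    rw [cLoop_eq_dLoop hl lines hglob (pos + t + 1) (by omega) _
      ((pos + t : Nat) : Int) (by push_cast; ring) _ hcur']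
    conv_rhs => rw [dLoop]
    simp only [bBody, hi, hsec]
    suffices hd : (if (lines.drop pos).take t ≠ [] ∧ h ≠ "" then
        d.insert h ((lines.drop pos).take t) else d) =
        (if (lines.drop pos).take t ≠ [] then d.insert h ((lines.drop pos).take t) else d) by
      rw [hd]
    by_cases hg : (lines.drop pos).take t = []
    · rw [if_neg (by simp [hg]), if_neg (by simp [hg])]
    · have ht1 : 1 ≤ t := by
        by_contra hc
        have : t = 0 := by omega
        rw [this, List.take_zero] at hg
        exact hg rfl
      have hposn : pos < lines.length := by omega
      have hhne : h ≠ "" := by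
        rcases hcur with hne | hall | ⟨_, hq⟩
        · exact hne
        · exfalso
          have := hall (pos + t) (by omega) htabs
          rw [this] at hhead
          cases hhead
        · -- a heading at pos itself forces t = 0
          exfalso
          have hdp : lines.drop pos = lines[pos] :: lines.drop (pos + 1) :=
            List.drop_eq_getElem_cons hposn
          have hq' : aIsHead hl lines[pos] = true := by
            have hg0 : lines.getD pos "" = lines[pos] := by
              rw [List.getD_eq_getElem?_getD, List.getElem?_eq_getElem hposn,
                Option.getD_some]
            rwa [hg0] at hq
          rw [hdp, List.findIdx?_cons, if_pos hq'] at hf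
          injection hf with hf
          omega
      rw [if_pos ⟨hg, hhne⟩, if_pos hg]
termination_by lines.length - pos
decreasing_by omega

-- ===== VERDICT =====
theorem separate_by_heading_spec : Claim_equal_separate_by_heading := by
  intro lines hl _hdom hpre
  obtain ⟨hpre1, hnex⟩ := hpre
  have hglob : ∀ i : Nat, i < lines.length → PySem.Str.strip (lines.getD i "") = "" →
      "" ∈ hl → i + 1 < lines.length →
      PySem.Str.strip (lines.getD (i + 1) "") ∉ hl →
      ∀ j : Nat, j < lines.length → i + 1 < j →
      PySem.Str.strip (lines.getD j "") ∈ hl → False := by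
    intro i hi hzi hzin hn hnh j hj hij hjm
    exact hnex ⟨i, hi, hzi, hzin, hn, hnh, j, hj, hij, hjm⟩
  unfold Spec_separate_by_heading separate_by_heading separate_by_heading_alt
  rcases hpre1 with hnil | ⟨l, hmem, hhead⟩
  · subst hnil
    simp [aRun, PySem.List.enumerate_nil]
  · have hfind : ∃ k, lines.findIdx? (aIsHead hl) = some k := by
      cases hf : lines.findIdx? (aIsHead hl) with
      | none =>
        have := List.findIdx?_eq_none_iff.mp hf l hmem
        rw [aIsHead] at this
        rw [List.contains_eq_mem] at this
        simp [hhead] at this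
      | some k => exact ⟨k, rfl⟩
    obtain ⟨k, hk⟩ := hfind
    have hkn : k < lines.length := by
      have := List.findIdx?_eq_some_iff_findIdx_eq.mp hk
      omega
    -- B side: heads = headsFrom 0, bounds via drop 1, fold = dLoop
    have hheads := heads_eq_headsFrom hl lines 0 (Nat.zero_le _)
    rw [List.drop_zero] at hheads
    have hc0 : ((0 : Nat) : Int) = (0 : Int) := by norm_num
    rw [hc0] at hheads
    simp only [hheads, PySem.List.slice_from_one, ← List.drop_one]
    rw [zip_fold_eq_dLoop]
    -- headsFrom 0 starts with the first heading at k
    have h0 := headsFrom_eq_find hl lines 0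
    rw [List.drop_zero, hk] at h0
    simp only [Nat.zero_add] at h0
    -- A side
    rw [aRun_none hl lines k hk PySem.Dict.empty []]
    have hhk0 : aIsHead hl (lines.getD k "") = true := by
      obtain ⟨hb, hp, _⟩ := List.findIdx?_eq_some_iff_getElem.mp hk
      rw [List.getD_eq_getElem?_getD, List.getElem?_eq_getElem hb, Option.getD_some]
      exact hp
    have hcur := mk_hcur hl lines hglob k hkn hhk0
    rw [cLoop_eq_dLoop hl lines hglob (k + 1) (by omega) _ ((k : Nat) : Int)
      (by push_cast; ring) _ hcur]
    rw [h0]
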